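-- pv_equiv track=rewrite | github.com/ShabariRepo/bonito | backend/app/services/saml_service.py | _map_role
-- ===== SOURCE A (Python) =====
-- from typing import Optional
--
-- def _map_role(groups: list[str], role_mapping: Optional[dict]) -> str:
--     """Map IdP groups to a Bonito role.
--
--     Checks groups against role_mapping. If multiple groups match,
--     the highest-privilege role wins (admin > member > viewer).
--     Falls back to "default" key in mapping, then "viewer".
--     """
--     if not role_mapping or not groups:
--         default = (role_mapping or {}).get("default", "viewer")
--         return default if default in ("admin", "member", "viewer") else "viewer"
--
--     role_priority = {"admin": 3, "member": 2, "viewer": 1}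
--     best_role = None
--     best_priority = 0
--
--     for group in groups:
--         mapped = role_mapping.get(group)
--         if mapped and mapped in role_priority:
--             if role_priority[mapped] > best_priority:
--                 best_role = mapped
--                 best_priority = role_priority[mapped]
--
--     if best_role:
--         return best_role
--
--     # Fall back to default
--     default = role_mapping.get("default", "viewer")
--     return default if default in ("admin", "member", "viewer") else "viewer"
-- ===== SOURCE B (Python) =====
-- from typing import Optional
--
--
-- def _fallback(role_mapping: dict) -> str:
--     default = role_mapping.get("default", "viewer")
--     return default if default in ("admin", "member", "viewer") else "viewer"
--
--
-- def _map_role(groups: list[str], role_mapping: Optional[dict]) -> str: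
--     if not role_mapping or not groups:
--         return _fallback(role_mapping or {})
--     for role in ("admin", "member", "viewer"):
--         if any(role_mapping.get(g) == role for g in groups):
--             return role
--     return _fallback(role_mapping)
-- ===== Notes on version B (the rewrite author's own statement) =====
-- stated objective: simpler
-- what changed: Replaces the single-pass best-priority/best-role accumulator with an outer scan over the roles in fixed descending-priority order, returning the first role some group maps to; the priority table and accumulator state disappear and the fallback is factored into one helper.
import Mathlib
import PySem

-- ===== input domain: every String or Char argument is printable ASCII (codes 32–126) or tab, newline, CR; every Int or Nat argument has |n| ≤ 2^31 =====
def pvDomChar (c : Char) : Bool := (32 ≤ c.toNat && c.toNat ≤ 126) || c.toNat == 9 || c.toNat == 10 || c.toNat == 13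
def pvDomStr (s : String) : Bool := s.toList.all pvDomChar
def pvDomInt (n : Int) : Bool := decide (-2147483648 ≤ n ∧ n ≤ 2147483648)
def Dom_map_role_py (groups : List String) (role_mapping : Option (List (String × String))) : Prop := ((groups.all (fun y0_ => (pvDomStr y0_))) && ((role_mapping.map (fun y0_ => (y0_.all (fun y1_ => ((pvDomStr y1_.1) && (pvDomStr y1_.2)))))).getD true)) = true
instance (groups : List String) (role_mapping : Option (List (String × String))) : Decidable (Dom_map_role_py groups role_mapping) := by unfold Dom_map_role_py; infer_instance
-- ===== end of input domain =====

-- B replaces A's best-priority accumulator pass by an outer scan over the roles in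
-- descending-priority order (simpler decomposition; same behaviour, return value only).

-- ===== PORT A =====
-- A's single pass tracking (best_role, best_priority), then the fallback.
def map_role_py (groups : List String) (role_mapping : Option (List (String × String))) : String :=
  let m : PySem.Dict String String := PySem.Dict.mk (role_mapping.getD [])
  if role_mapping.getD [] = [] ∨ groups = [] then
    -- `not role_mapping`: None or empty dict; `(role_mapping or {})` is then empty
    let dflt := m.getD "default" "viewer"
    if dflt = "admin" ∨ dflt = "member" ∨ dflt = "viewer" then dflt else "viewer"
  else
    let rolePriority : PySem.Dict String Int :=
      PySem.Dict.mk [("admin", 3), ("member", 2), ("viewer", 1)]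
    let st := groups.foldl (fun (st : Option String × Int) group =>
      match m.get? group with
      | some mapped =>
          if mapped ≠ "" ∧ rolePriority.contains mapped then
            if rolePriority.getD mapped 0 > st.2 then (some mapped, rolePriority.getD mapped 0)
            else st
          else st
      | none => st) ((none : Option String), (0 : Int))
    match st.1 with
    | some best =>
        if best ≠ "" then best
        else
          let dflt := m.getD "default" "viewer"
          if dflt = "admin" ∨ dflt = "member" ∨ dflt = "viewer" then dflt else "viewer"
    | none =>
        let dflt := m.getD "default" "viewer"
        if dflt = "admin" ∨ dflt = "member" ∨ dflt = "viewer" then dflt else "viewer"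

-- ===== PORT B =====
-- helper `_fallback` of Source B
def pvFallbackRole (m : PySem.Dict String String) : String :=
  let dflt := m.getD "default" "viewer"
  if dflt = "admin" ∨ dflt = "member" ∨ dflt = "viewer" then dflt else "viewer"

def map_role_py_alt (groups : List String) (role_mapping : Option (List (String × String))) : String :=
  let m : PySem.Dict String String := PySem.Dict.mk (role_mapping.getD [])
  if role_mapping.getD [] = [] ∨ groups = [] then pvFallbackRole m
  else
    match ["admin", "member", "viewer"].find?
        (fun r => groups.any (fun g => m.get? g == some r)) with
    | some r => r
    | none => pvFallbackRole m

-- ===== PRECONDITION & SPEC =====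
def Spec_map_role_py (groups : List String) (role_mapping : Option (List (String × String))) (out : String) : Prop := out = map_role_py_alt groups role_mapping
instance (groups : List String) (role_mapping : Option (List (String × String))) (out : String) : Decidable (Spec_map_role_py groups role_mapping out) := by unfold Spec_map_role_py; infer_instance

-- ===== CLAIM (what is proved, stated in full; the proofs are below) =====
def Claim_equal_map_role_py : Prop := ∀ (groups : List String) (role_mapping : Option (List (String × String))), Dom_map_role_py groups role_mapping → Spec_map_role_py groups role_mapping (map_role_py groups role_mapping)

-- ===== LEMMAS AND PROOFS =====

-- the priority of the role a group maps to (0 if unmapped / not a role)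
def pvLp (m : PySem.Dict String String) (g : String) : Int :=
  match m.get? g with
  | none => 0
  | some s => if s = "admin" then 3 else if s = "member" then 2 else if s = "viewer" then 1 else 0

-- A's loop body
def pvStep (m : PySem.Dict String String) (st : Option String × Int) (group : String) :
    Option String × Int :=
  let rolePriority : PySem.Dict String Int :=
    PySem.Dict.mk [("admin", 3), ("member", 2), ("viewer", 1)]
  match m.get? group with
  | some mapped =>
      if mapped ≠ "" ∧ rolePriority.contains mapped then
        if rolePriority.getD mapped 0 > st.2 then (some mapped, rolePriority.getD mapped 0)
        else st
      else st
  | none => st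

-- the only reachable loop states, indexed by the priority
def pvRoleSt (p : Int) : Option String × Int :=
  if p = 3 then (some "admin", 3)
  else if p = 2 then (some "member", 2)
  else if p = 1 then (some "viewer", 1)
  else ((none : Option String), (0 : Int))

lemma pvLp_cases (m : PySem.Dict String String) (g : String) :
    pvLp m g = 0 ∨ pvLp m g = 1 ∨ pvLp m g = 2 ∨ pvLp m g = 3 := by
  unfold pvLp
  cases m.get? g with
  | none => simp
  | some s => dsimp only; split_ifs <;> simp

lemma pvLp_eq3_iff (m : PySem.Dict String String) (g : String) :
    pvLp m g = 3 ↔ m.get? g = some "admin" := by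
  unfold pvLp
  cases h : m.get? g with
  | none => simp
  | some s => dsimp only; split_ifs with h1 h2 h3 <;> simp_all
lemma pvLp_eq2_iff (m : PySem.Dict String String) (g : String) :
    pvLp m g = 2 ↔ m.get? g = some "member" := by
  unfold pvLp
  cases h : m.get? g with
  | none => simp
  | some s => dsimp only; split_ifs with h1 h2 h3 <;> simp_all
lemma pvLp_eq1_iff (m : PySem.Dict String String) (g : String) :
    pvLp m g = 1 ↔ m.get? g = some "viewer" := by
  unfold pvLp
  cases h : m.get? g with
  | none => simp
  | some s => dsimp only; split_ifs with h1 h2 h3 <;> simp_all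

lemma pvStep_roleSt (m : PySem.Dict String String) (g : String) (p : Int)
    (hp : p = 0 ∨ p = 1 ∨ p = 2 ∨ p = 3) :
    pvStep m (pvRoleSt p) g = pvRoleSt (max p (pvLp m g)) := by
  unfold pvStep pvLp
  cases h : m.get? g with
  | none =>
      rcases hp with h | h | h | h <;> subst h <;> simp [pvRoleSt]
  | some s =>
      by_cases h1 : s = "admin"
      · subst h1; rcases hp with h | h | h | h <;> subst h <;> simp [pvRoleSt] <;> decide
      · by_cases h2 : s = "member"
        · subst h2; rcases hp with h | h | h | h <;> subst h <;> simp [pvRoleSt] <;> decide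
        · by_cases h3 : s = "viewer"
          · subst h3; rcases hp with h | h | h | h <;> subst h <;> simp [pvRoleSt] <;> decide
          · have hc : (PySem.Dict.mk [("admin", (3:Int)), ("member", 2), ("viewer", 1)]).contains s = false := by
              simp [PySem.Dict.contains_mk]
              exact ⟨fun e => h1 e.symm, fun e => h2 e.symm, fun e => h3 e.symm⟩
            rcases hp with h | h | h | h <;> subst h <;>
              simp [pvRoleSt, hc, h1, h2, h3]

-- the max-priority accumulator
def pvMaxP (m : PySem.Dict String String) (p : Int) (gs : List String) : Int :=
  gs.foldl (fun a g => max a (pvLp m g)) p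

lemma pvFoldl_eq_roleSt (m : PySem.Dict String String) (gs : List String) (p : Int)
    (hp : p = 0 ∨ p = 1 ∨ p = 2 ∨ p = 3) :
    gs.foldl (pvStep m) (pvRoleSt p) = pvRoleSt (pvMaxP m p gs) := by
  induction gs generalizing p with
  | nil => simp [pvMaxP]
  | cons g gs ih =>
      have hq : max p (pvLp m g) = 0 ∨ max p (pvLp m g) = 1 ∨
          max p (pvLp m g) = 2 ∨ max p (pvLp m g) = 3 := by
        rcases pvLp_cases m g with h | h | h | h <;> rw [h] <;> omega
      simp only [List.foldl_cons, pvStep_roleSt m g p hp, pvMaxP]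
      exact ih _ hq

lemma pvMaxP_le_init (m : PySem.Dict String String) (gs : List String) (p : Int) :
    p ≤ pvMaxP m p gs := by
  induction gs generalizing p with
  | nil => simp [pvMaxP]
  | cons g gs ih =>
      calc p ≤ max p (pvLp m g) := le_max_left _ _
        _ ≤ pvMaxP m (max p (pvLp m g)) gs := ih _
        _ = pvMaxP m p (g :: gs) := rfl

lemma pvMaxP_ge_mem (m : PySem.Dict String String) (gs : List String) (p : Int)
    (g : String) (hg : g ∈ gs) : pvLp m g ≤ pvMaxP m p gs := by
  induction gs generalizing p with
  | nil => cases hg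
  | cons a gs ih =>
      rcases List.mem_cons.mp hg with h | h
      · subst h
        calc pvLp m g ≤ max p (pvLp m g) := le_max_right _ _
          _ ≤ pvMaxP m (max p (pvLp m g)) gs := pvMaxP_le_init m gs _
          _ = pvMaxP m p (g :: gs) := rfl
      · exact ih _ h

lemma pvMaxP_attained (m : PySem.Dict String String) (gs : List String) (p : Int) :
    pvMaxP m p gs = p ∨ ∃ g ∈ gs, pvMaxP m p gs = pvLp m g := by
  induction gs generalizing p with
  | nil => left; simp [pvMaxP]
  | cons g gs ih =>
      have : pvMaxP m p (g :: gs) = pvMaxP m (max p (pvLp m g)) gs := rfl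
      rw [this]
      rcases ih (max p (pvLp m g)) with h | ⟨g', hg', h⟩
      · rcases max_choice p (pvLp m g) with hm | hm
        · left; rw [h, hm]
        · right; exact ⟨g, List.mem_cons_self, by rw [h, hm]⟩
      · right; exact ⟨g', List.mem_cons_of_mem _ hg', h⟩

-- ===== VERDICT (by name: the statement is the Claim_ definition above) =====
theorem map_role_py_spec : Claim_equal_map_role_py := by
  intro groups role_mapping _
  unfold Spec_map_role_py map_role_py map_role_py_alt pvFallbackRole
  set m : PySem.Dict String String := PySem.Dict.mk (role_mapping.getD []) with hm
  by_cases hguard : role_mapping.getD [] = [] ∨ groups = []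
  · simp only [hguard, if_pos]
  · simp only [hguard, if_neg, not_false_eq_true]
    have hfold : groups.foldl (pvStep m) (pvRoleSt 0) = pvRoleSt (pvMaxP m 0 groups) :=
      pvFoldl_eq_roleSt m groups 0 (by omega)
    have hstep : (fun (st : Option String × Int) group =>
        match m.get? group with
        | some mapped =>
            if mapped ≠ "" ∧ (PySem.Dict.mk [("admin", (3:Int)), ("member", 2), ("viewer", 1)]).contains mapped then
              if (PySem.Dict.mk [("admin", (3:Int)), ("member", 2), ("viewer", 1)]).getD mapped 0 > st.2 then
                (some mapped, (PySem.Dict.mk [("admin", (3:Int)), ("member", 2), ("viewer", 1)]).getD mapped 0)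
              else st
            else st
        | none => st) = pvStep m := by
      funext st g; rfl
    rw [hstep]
    have h0 : pvRoleSt 0 = ((none : Option String), (0 : Int)) := rfl
    rw [← h0, hfold]
    have hPmem : pvMaxP m 0 groups = 0 ∨ pvMaxP m 0 groups = 1 ∨ pvMaxP m 0 groups = 2 ∨ pvMaxP m 0 groups = 3 := by
      rcases pvMaxP_attained m groups 0 with h | ⟨g, _, h⟩
      · left; exact h
      · rw [h]; exact pvLp_cases m g
    have hha : (∃ g ∈ groups, m.get? g = some "admin") ↔ 3 ≤ pvMaxP m 0 groups := by
      constructor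
      · rintro ⟨g, hg, h⟩
        have := pvMaxP_ge_mem m groups 0 g hg
        rw [(pvLp_eq3_iff m g).mpr h] at this; exact this
      · intro h
        rcases pvMaxP_attained m groups 0 with h0' | ⟨g, hg, hgp⟩
        · omega
        · exact ⟨g, hg, (pvLp_eq3_iff m g).mp (by omega)⟩
    have hhm : (∃ g ∈ groups, m.get? g = some "member") → 2 ≤ pvMaxP m 0 groups := by
      rintro ⟨g, hg, h⟩
      have := pvMaxP_ge_mem m groups 0 g hg
      rw [(pvLp_eq2_iff m g).mpr h] at this; omega
    have hhv : (∃ g ∈ groups, m.get? g = some "viewer") → 1 ≤ pvMaxP m 0 groups := by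
      rintro ⟨g, hg, h⟩
      have := pvMaxP_ge_mem m groups 0 g hg
      rw [(pvLp_eq1_iff m g).mpr h] at this; omega
    have hAny : ∀ r : String, (groups.any (fun g => m.get? g == some r)) = true ↔
        ∃ g ∈ groups, m.get? g = some r := by intro r; simp
    rcases hPmem with h | h | h | h
    · -- no group maps to any role; both sides fall back
      have hna : (groups.any (fun g => m.get? g == some "admin")) = false := by
        rw [Bool.eq_false_iff]; intro hc
        have := hha.mp ((hAny _).mp hc); omega
      have hnm : (groups.any (fun g => m.get? g == some "member")) = false := by
        rw [Bool.eq_false_iff]; intro hc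
        have := hhm ((hAny _).mp hc); omega
      have hnv : (groups.any (fun g => m.get? g == some "viewer")) = false := by
        rw [Bool.eq_false_iff]; intro hc
        have := hhv ((hAny _).mp hc); omega
      rw [h]
      simp only [List.find?]
      rw [hna, hnm, hnv]
      rfl
    · -- viewer wins
      rcases pvMaxP_attained m groups 0 with h0' | ⟨g, hg, hgp⟩
      · omega
      · have hv : m.get? g = some "viewer" := (pvLp_eq1_iff m g).mp (by omega)
        have hna : (groups.any (fun g => m.get? g == some "admin")) = false := by
          rw [Bool.eq_false_iff]; intro hc
          have := hha.mp ((hAny _).mp hc); omega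
        have hnm : (groups.any (fun g => m.get? g == some "member")) = false := by
          rw [Bool.eq_false_iff]; intro hc
          have := hhm ((hAny _).mp hc); omega
        have hyv : (groups.any (fun g => m.get? g == some "viewer")) = true :=
          (hAny _).mpr ⟨g, hg, hv⟩
        rw [h]
        simp only [List.find?]
        rw [hna, hnm, hyv]
        rfl
    · -- member wins
      rcases pvMaxP_attained m groups 0 with h0' | ⟨g, hg, hgp⟩
      · omega
      · have hv : m.get? g = some "member" := (pvLp_eq2_iff m g).mp (by omega)
        have hna : (groups.any (fun g => m.get? g == some "admin")) = false := by
          rw [Bool.eq_false_iff]; intro hc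
          have := hha.mp ((hAny _).mp hc); omega
        have hym : (groups.any (fun g => m.get? g == some "member")) = true :=
          (hAny _).mpr ⟨g, hg, hv⟩
        rw [h]
        simp only [List.find?]
        rw [hna, hym]
        rfl
    · -- admin wins
      have ⟨g, hg, hv⟩ := hha.mpr (by omega)
      have hya : (groups.any (fun g => m.get? g == some "admin")) = true :=
        (hAny _).mpr ⟨g, hg, hv⟩
      rw [h]
      simp only [List.find?]
      rw [hya]
      rfl
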